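/-
  jsmn_s.bin: `jsmn_parse_primitive`, third part: the two call sites.
    prim_token   1000E8H (found, with a token array) → call jsmn_alloc_token → prim_nomem | prim_fill          (6 instructions + the callee)
    prim_fill    1000FBH (a token was allocated)     → call jsmn_fill_token → prim_dec                          (8 instructions + the callee)
  The callees are used through their contracts (`AllocSpec`, `FillSpec`).
-/
import Prog.Jsmn.S.PrimExit

namespace X86
namespace J6
namespace S
open X86.User (CodeAt RegsKept Span FlagsOK Layout toNat_add_ofNat toNat_ofNat_lt' add_ofNat_add)
open Jsmn JsmnSBytes

set_option maxRecDepth 100000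
set_option maxHeartbeats 4000000
set_option linter.unusedSimpArgs false
set_option linter.unusedVariables false

variable {n : User.Layout} {v0 : User.State} {ret pa jsA tb : Word} {js : List UInt8} {numTokens : Nat} {p pc : Parser} {toks tc : Option Tokens}

/-- A caller's data region is a data region of its callee (whose stack lies below the caller's window). -/
theorem region_callee {b : Bin} {v1 : User.State} {use : Nat} {a : Word} {len : Nat} (h : Region b n v0 use a len)
    (h1 : (v1.reg .rsp).toNat + 8 ≤ (v0.reg .rsp).toNat) (h2 : (v0.reg .rsp).toNat - use ≤ (v1.reg .rsp).toNat) : Region b n v1 0 a len :=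
  ⟨h.lo, h.hi, h.img, by have := h.stk; omega⟩

theorem u32_i32 (x : Nat) (h : x < 2 ^ 32) : u32 (i32 x) = x := by unfold u32 i32; omega

set_option hygiene false in
/-- `PrimFrame` at the view `v1` a callee returned to (with `v3_open hf hpost1`, `hk := hpost1.kept` and the callee's footprint `hpost1_same`
normalised in the context): everything but the `parser` and `toksArg` fields. -/
macro "prims_frame_call" : tactic => `(tactic|
  refine ⟨by rw [hk.get .rbx rfl]; v3_regnorm; exact hf_rbx, by rw [hk.get .rbp rfl]; v3_regnorm; exact hf_rbp, hpost1_rsp,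
    by rw [hk.get .r13 rfl]; v3_regnorm; exact hf_r13,
    by rw [hk.get .r14 rfl]; v3_regnorm; exact hf_r14, by rw [hk.get .r15 rfl]; v3_regnorm; exact hf_r15,
    by v3_frame hf_slotR12, by v3_frame hf_slotRbp, by v3_frame hf_slotRbx, by v3_frame hf_retA, by v3_frame hf_img, ?_, ?_, rfl,
    by simp only [toksBytes, tokSize_strictLinks]; v3_same⟩)

/-- A token was allocated (`rax = &tokens[i]`): `jsmn_fill_token(token, JSMN_PRIMITIVE, start, parser->pos); token->parent = parser->toksuper; parser->pos--; return 0`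
(the token pointer lives in r12 across the call). -/
theorem prim_fill (hfill : FillSpec binS n) {ts ts1 : Tokens} {p1 : Parser} {i : Nat}
    (hp : ScanPre binS n binS.prim binS.usePrim v0 ret pa jsA tb js numTokens p (some ts)) {v : User.State}
    (hrip : v.rip = 0x1000fb) (hf : PrimFrame v0 ret pa tb numTokens p (some ts) p1 (some ts1) v)
    (hrax : v.reg .rax = tokAddr Config.strictLinks tb i) (hi : i < numTokens) :
    Reach n v (ScanPost binS binS.usePrim v0 ret pa tb numTokens (some ts) 0 { p1 with pos := u32 ((p1.pos : Int) - 1) }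
      (some ((ts1.set i (fillToken (ts1.getD i default) JSMN_PRIMITIVE (i32 p.pos) (i32 p1.pos))).set i
        { (ts1.set i (fillToken (ts1.getD i default) JSMN_PRIMITIVE (i32 p.pos) (i32 p1.pos))).getD i default with
          parent := p1.toksuper }))) := by
  have hR := hp.toksRegion
  v3_open hp hf hR
  j6_bin
  obtain ⟨htb0, hlen1, hts1⟩ := hf_toksArg
  simp only [toksBytes, tokSize_strictLinks] at *
  have hcode := JsmnS.tjs_jsmn_parse_primitive_code hf_img
  have hplt : p.pos < 2 ^ 32 := hp_parser_pos ▸ User.Mem.readLE4_lt _ _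
  have hqlt : p1.pos < 2 ^ 32 := hf_parser_pos ▸ User.Mem.readLE4_lt _ _
  have htbn : tb.toNat ≠ 0 := fun h => htb0 (UInt64.toNat_inj.mp h)
  have haddr : tokAddr Config.strictLinks tb i = tb + UInt64.ofNat (20 * i) := by unfold tokAddr; rw [tokSize_strictLinks]
  rw [haddr] at hrax
  have hsz : Config.strictLinks.tokSize * ts1.length = 20 * numTokens := by rw [tokSize_strictLinks, hlen1]
  v3_walk hcode hp.call.fetch []
  refine Reach.trans (hfill _ 0x100114 tb ts1 i JSMN_PRIMITIVE (i32 p.pos) (i32 p1.pos)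
    ⟨show CallPre n 0x100000 image_bytes 0x10007e 0 0x100114 _ by v3_callpre hf_img hp.call, by v3_regnorm; exact haddr.symm, by v3_regnorm; rfl,
      by v3_regnorm; rw [u32_i32 _ hplt, Word.low32_ofNat_of_lt hplt, Word.low32_ofNat_of_lt hplt],
      by v3_regnorm; rw [u32_i32 _ hqlt, Word.low32_ofNat_of_lt hqlt, Word.low32_ofNat_of_lt hqlt], by decide, i32_range _, i32_range _,
      by rw [hlen1]; exact hi, by show TokensAt Config.strictLinks _ _ _; v3_frame hts1,
      by rw [hlen1]; exact region_callee hp.toksRegion (by v3_regnorm; v3_omega) (by v3_regnorm; v3_omega)⟩) ?_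
  intro v2 hpost
  obtain ⟨hpost1, htoks2⟩ := hpost
  v3_open hpost1
  have hk := hpost1.kept
  v3_viewnorm at hpost1_rsp hpost1_same hpost1_rip
  have hsp : (v0.reg .rsp - 32).toNat = (v0.reg .rsp).toNat - 32 := by v3_omega
  rw [binS_cfg, hsz, hsp] at hpost1_same
  refine prim_dec hp hpost1_rip ?_ (by rw [hk.get .r12 rfl]; v3_regnorm; exact haddr.symm) hi
  prims_frame_call
  · v3_frame hf.parser
  · exact ⟨htb0, by rw [List.length_set]; exact hlen1, htoks2⟩

/-- `found` with a token array: `jsmn_alloc_token(parser, tokens, num_tokens)`, then what the model's `allocToken` says: no room (NOMEM,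
`pos` restored), or the token filled as a primitive `[start, q)` with its parent link and `pos = q - 1`. -/
theorem prim_token (halloc : AllocSpec binS n) (hfill : FillSpec binS n) {ts : Tokens}
    (hp : ScanPre binS n binS.prim binS.usePrim v0 ret pa jsA tb js numTokens p (some ts)) {q : Nat} {v : User.State}
    (hrip : v.rip = 0x1000e8) (hf : PrimFrame v0 ret pa tb numTokens p (some ts) { p with pos := q } (some ts) v)
    (hr : PrimRegs jsA tb js numTokens v) :
    Reach n v (fun v' => match allocToken Config.strictLinks { p with pos := q } ts numTokens with
      | none => ScanPost binS binS.usePrim v0 ret pa tb numTokens (some ts) JSMN_ERROR_NOMEM p (some ts) v'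
      | some (i, p1, ts1) => ScanPost binS binS.usePrim v0 ret pa tb numTokens (some ts) 0 { p1 with pos := u32 ((q : Int) - 1) }
          (some ((ts1.set i (fillToken (ts1.getD i default) JSMN_PRIMITIVE (i32 p.pos) (i32 q))).set i
            { (ts1.set i (fillToken (ts1.getD i default) JSMN_PRIMITIVE (i32 p.pos) (i32 q))).getD i default with
              parent := p.toksuper })) v') := by
  have hR := hp.toksRegion
  v3_open hp hf hr hR
  j6_bin
  obtain ⟨htb0, hlen, hts⟩ := hf_toksArg
  simp only [toksBytes, tokSize_strictLinks] at *
  have hcode := JsmnS.tjs_jsmn_parse_primitive_code hf_img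
  have htbn : tb.toNat ≠ 0 := fun h => htb0 (UInt64.toNat_inj.mp h)
  have hsz : Config.strictLinks.tokSize * ts.length = 20 * numTokens := by rw [tokSize_strictLinks, hlen]
  v3_walk hcode hp.call.fetch []
  refine Reach.trans (halloc _ 0x1000fb pa tb numTokens { p with pos := q } ts
    ⟨show CallPre n 0x100000 image_bytes 0x100040 0 0x1000fb _ by v3_callpre hf_img hp.call, by v3_regnorm, by v3_regnorm, by v3_regnorm, hp.nlt,
      by v3_frame hf.parser, by show TokensAt Config.strictLinks _ _ _; v3_frame hts, hlen,
      region_callee hp.env.parserR (by v3_regnorm; v3_omega) (by v3_regnorm; v3_omega),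
      region_callee hp.toksRegion (by v3_regnorm; v3_omega) (by v3_regnorm; v3_omega), hp.env.parserToks⟩) ?_
  intro v1 hpost
  obtain ⟨hpost1, hres⟩ := hpost
  v3_open hpost1
  have hk := hpost1.kept
  v3_viewnorm at hpost1_rsp hpost1_same hpost1_rip
  have hsp : (v0.reg .rsp - 32).toNat = (v0.reg .rsp).toNat - 32 := by v3_omega
  unfold dataWins at hpost1_same
  rw [binS_cfg, tokSize_strictLinks, hsp] at hpost1_same
  rw [binS_cfg] at hres
  by_cases hge : p.toknext ≥ numTokens
  · -- no room: rax = NULL, memory as before the call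
    simp only [allocToken, hge, if_true] at hres ⊢
    obtain ⟨hrax1, hmem1⟩ := hres
    v3_viewnorm at hmem1
    refine prim_nomem (q := q) hp hpost1_rip ?_ hrax1
    prims_frame_call
    · rw [hmem1]; v3_frame hf.parser
    · exact ⟨htb0, hlen, by rw [hmem1]; v3_frame hts⟩
  · -- tokens[toknext] allocated
    simp only [allocToken, hge, if_false] at hres ⊢
    refine prim_fill (p1 := ⟨q, u32 ((p.toknext : Int) + 1), p.toksuper⟩) (i := p.toknext) hfill hp hpost1_rip ?_ hres.1 (by omega)
    prims_frame_call
    · exact hres.2.1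
    · exact ⟨htb0, by rw [List.length_set]; exact hlen, hres.2.2⟩

end S
end J6
end X86
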